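-- pv_equiv track=rewrite | github.com/brianmego/advent_of_code_2017 | days/day_4.py | validate_passphrase
-- ===== SOURCE A (Python) =====
-- def validate_passphrase(input_str, allow_anagrams=True):
--     input_str = str(input_str)
--     words = input_str.split()
--     if not allow_anagrams:
--         words = [''.join(sorted(x)) for x in words]
--     if len(words) == len(set(words)):
--         return True
--     return False
-- ===== SOURCE B (Python) =====
-- def validate_passphrase(input_str, allow_anagrams=True):
--     input_str = str(input_str)
--     words = input_str.split()
--     if not allow_anagrams:
--         words = [''.join(sorted(x)) for x in words]
--     words.sort()
--     for i in range(len(words) - 1):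
--         if words[i] == words[i + 1]:
--             return False
--     return True
-- ===== Notes on version B (the rewrite author's own statement) =====
-- stated objective: alternative
-- what changed: Duplicate detection now sorts the word list and scans adjacent pairs instead of comparing the list's length with a hash set's cardinality.
import Mathlib
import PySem

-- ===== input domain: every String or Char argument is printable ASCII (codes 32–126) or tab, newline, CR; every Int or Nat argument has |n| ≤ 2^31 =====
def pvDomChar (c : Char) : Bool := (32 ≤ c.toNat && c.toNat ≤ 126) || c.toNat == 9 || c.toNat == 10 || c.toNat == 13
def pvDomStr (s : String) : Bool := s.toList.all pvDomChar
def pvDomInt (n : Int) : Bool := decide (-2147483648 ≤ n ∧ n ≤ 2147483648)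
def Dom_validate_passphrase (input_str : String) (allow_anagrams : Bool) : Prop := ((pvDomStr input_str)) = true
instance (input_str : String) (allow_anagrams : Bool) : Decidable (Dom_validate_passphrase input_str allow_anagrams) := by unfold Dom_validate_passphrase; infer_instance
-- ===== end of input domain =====

-- B detects duplicate words by sorting the word list and comparing adjacent pairs instead of
-- A's hash-set cardinality comparison; objective: alternative (no speed claim).

-- ===== PORT A =====
def validate_passphrase (input_str : String) (allow_anagrams : Bool) : Bool :=
  let words := PySem.Str.split₀ input_str
  let words := if !allow_anagrams
    then words.map (fun x => String.ofList (PySem.List.sorted x.toList (fun c => c) false))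
    else words
  if words.length = (PySem.Set.ofList words).length then true else false

-- ===== PORT B =====
-- the 'for i in range(len(words)-1): if words[i] == words[i+1]: return False' scan
def pvNoAdjDup : List String → Bool
  | a :: b :: rest => if a = b then false else pvNoAdjDup (b :: rest)
  | _ => true

def validate_passphrase_alt (input_str : String) (allow_anagrams : Bool) : Bool :=
  let words := PySem.Str.split₀ input_str
  let words := if !allow_anagrams
    then words.map (fun x => String.ofList (PySem.List.sorted x.toList (fun c => c) false))
    else words
  pvNoAdjDup (PySem.List.sorted words (fun x => x) false)

-- ===== PRECONDITION & SPEC =====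
def Spec_validate_passphrase (input_str : String) (allow_anagrams : Bool) (out : Bool) : Prop := out = validate_passphrase_alt input_str allow_anagrams
instance (input_str : String) (allow_anagrams : Bool) (out : Bool) : Decidable (Spec_validate_passphrase input_str allow_anagrams out) := by unfold Spec_validate_passphrase; infer_instance

-- ===== CLAIM (what is proved, stated in full; the proofs are below) =====
def Claim_equal_validate_passphrase : Prop := ∀ (input_str : String) (allow_anagrams : Bool), Dom_validate_passphrase input_str allow_anagrams → Spec_validate_passphrase input_str allow_anagrams (validate_passphrase input_str allow_anagrams)

-- ===== LEMMAS AND PROOFS =====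

-- len(words) == len(set(words)) says exactly that the words are pairwise distinct
theorem pv_len_ofList_iff_nodup (xs : List String) :
    xs.length = (PySem.Set.ofList xs).length ↔ xs.Nodup := by
  constructor
  · intro h
    induction xs with
    | nil => simp
    | cons x xs ih =>
      rw [PySem.Set.ofList_cons] at h
      simp only [List.length_cons, PySem.Set.discard] at h
      have hle1 : ((PySem.Set.ofList xs).filter (fun y => !y == x)).length ≤ (PySem.Set.ofList xs).length :=
        List.length_filter_le _ _
      have hle2 : (PySem.Set.ofList xs).length ≤ xs.length := PySem.Set.length_ofList_le xs
      have heq : ((PySem.Set.ofList xs).filter (fun y => !y == x)).length = (PySem.Set.ofList xs).length := by omega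
      have hnd : xs.Nodup := ih (by omega)
      have hx : x ∉ PySem.Set.ofList xs := by
        intro hmem
        have := (List.length_filter_eq_length_iff).1 heq x hmem
        simp at this
      exact List.nodup_cons.2 ⟨fun hmem => hx (by simp [PySem.Set.mem_ofList, hmem]), hnd⟩
  · intro h
    rw [PySem.Set.ofList_eq_self_of_nodup xs h]

-- on a ≤-sorted list, no two adjacent equal elements means no duplicates at all
theorem pv_noAdjDup_iff_nodup (xs : List String)
    (hs : xs.Pairwise (fun a b => a ≤ b)) :
    pvNoAdjDup xs = true ↔ xs.Nodup := by
  induction xs with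
  | nil => simp [pvNoAdjDup]
  | cons a xs ih =>
    cases xs with
    | nil => simp [pvNoAdjDup]
    | cons b rest =>
      rw [List.pairwise_cons] at hs
      obtain ⟨hab, hrest⟩ := hs
      by_cases h : a = b
      · constructor
        · intro hc; simp [pvNoAdjDup, h] at hc
        · intro hnd
          exact absurd (h ▸ List.mem_cons_self) (List.nodup_cons.1 hnd).1
      · have : pvNoAdjDup (a :: b :: rest) = pvNoAdjDup (b :: rest) := by
          simp [pvNoAdjDup, h]
        rw [this, ih hrest]
        constructor
        · intro hnd
          refine List.nodup_cons.2 ⟨?_, hnd⟩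
          intro hmem
          rcases List.mem_cons.1 hmem with h1 | h1
          · exact h h1
          · -- a ≤ b and b ≤ a (since a appears after b in the sorted tail): a = b
            have hba : b ≤ a := (List.pairwise_cons.1 hrest).1 a h1
            exact h (le_antisymm (hab b List.mem_cons_self) hba)
        · intro hnd; exact (List.nodup_cons.1 hnd).2

theorem pv_core (words : List String) :
    (if words.length = (PySem.Set.ofList words).length then true else false)
      = pvNoAdjDup (PySem.List.sorted words (fun x => x) false) := by
  have hperm : (PySem.List.sorted words (fun x => x) false).Perm words :=
    PySem.List.sorted_perm words _ false
  have hpair : (PySem.List.sorted words (fun x => x) false).Pairwise (fun a b => a ≤ b) :=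
    PySem.List.sorted_pairwise words (fun x => x)
  rw [Bool.eq_iff_iff]
  constructor
  · intro h
    have hlen : words.length = (PySem.Set.ofList words).length := by
      by_contra hc; simp [hc] at h
    exact (pv_noAdjDup_iff_nodup _ hpair).2
      (hperm.nodup_iff.2 ((pv_len_ofList_iff_nodup words).1 hlen))
  · intro h
    have hnd : words.Nodup := hperm.nodup_iff.1 ((pv_noAdjDup_iff_nodup _ hpair).1 h)
    simp [(pv_len_ofList_iff_nodup words).2 hnd]

-- ===== VERDICT (by name: the statement is the Claim_ definition above) =====
theorem validate_passphrase_spec : Claim_equal_validate_passphrase := by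
  intro input_str allow_anagrams _
  unfold Spec_validate_passphrase validate_passphrase validate_passphrase_alt
  cases allow_anagrams <;> simp only [Bool.not_true, Bool.not_false, if_true] <;>
    exact pv_core _
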